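-- pv_equiv track=rewrite | github.com/pypi-data/pypi-mirror-342 | packages/dynamic-functioneer/dynamic_functioneer-1.1.1-py3-none-any.whl/dynamic_functioneer/llm_response_cleaner.py | remove_prefixes
-- ===== SOURCE A (Python) =====
-- def remove_prefixes(code: str, prefixes=None) -> str:
--     """
--     Removes specific prefixes at the start of each line (e.g. '- ', '* ').
--     Lines that do not match any prefix are unchanged.
--
--     Args:
--         code (str): The Python code or text to clean.
--         prefixes (List[str], optional): The list of prefixes to remove.
--                                         Defaults to ['- ', '* '].
--
--     Returns:
--         str: Code with the specified prefixes removed from line beginnings.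
--     """
--     if prefixes is None:
--         prefixes = ["- ", "* "]
--
--     cleaned_lines = []
--     for line in code.splitlines():
--         for prefix in prefixes:
--             if line.startswith(prefix):
--                 line = line[len(prefix):]
--                 # Only remove the first matching prefix, then stop checking
--                 break
--         cleaned_lines.append(line)
--     return "\n".join(cleaned_lines)
-- ===== SOURCE B (Python) =====
-- def remove_prefixes(code: str, prefixes=None) -> str:
--     """Inverted nesting: for each prefix (in list order) sweep over ALL lines,
--     stripping it from every still-unclaimed line that starts with it; a claimed
--     mask guarantees each line loses at most its first matching prefix."""
--     if prefixes is None: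
--         prefixes = ["- ", "* "]
--
--     lines = code.splitlines()
--     claimed = [False] * len(lines)
--     for prefix in prefixes:
--         for i, line in enumerate(lines):
--             if not claimed[i] and line.startswith(prefix):
--                 lines[i] = line[len(prefix):]
--                 claimed[i] = True
--     return "\n".join(lines)
-- ===== Notes on version B (the rewrite author's own statement) =====
-- stated objective: alternative
-- what changed: The loop nesting is inverted: instead of A's per-line inner scan over prefixes with a break, B makes one full sweep over all lines per prefix (in list order) maintaining a claimed-mask so each line is stripped by at most its first matching prefix; correctness follows because prefix passes run in list order and a claimed line is never touched again.
import Mathlib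
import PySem

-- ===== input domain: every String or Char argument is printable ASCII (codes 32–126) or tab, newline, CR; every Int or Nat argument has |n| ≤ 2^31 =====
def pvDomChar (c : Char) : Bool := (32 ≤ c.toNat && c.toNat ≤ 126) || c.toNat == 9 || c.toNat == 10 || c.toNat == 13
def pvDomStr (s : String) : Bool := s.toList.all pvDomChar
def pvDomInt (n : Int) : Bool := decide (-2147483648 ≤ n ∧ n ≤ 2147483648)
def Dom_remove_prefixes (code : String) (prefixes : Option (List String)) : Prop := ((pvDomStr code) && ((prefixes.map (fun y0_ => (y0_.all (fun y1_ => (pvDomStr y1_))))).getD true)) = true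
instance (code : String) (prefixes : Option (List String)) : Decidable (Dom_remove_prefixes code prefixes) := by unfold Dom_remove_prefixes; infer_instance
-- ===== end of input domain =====

-- B inverts the loop nesting: one sweep over all lines per prefix with a claimed-mask,
-- instead of A's per-line inner prefix loop with break; same cost, return value only.

-- ===== PORT A =====
-- inner 'for prefix in prefixes: if line.startswith(prefix): line = line[len(prefix):]; break'
def pvStripLoopA (ps : List String) (line : String) : String :=
  match ps with
  | [] => line
  | p :: rest =>
    if PySem.Str.startswith line p then
      PySem.Str.slice line (some (PySem.Str.len p)) none
    else
      pvStripLoopA rest line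

def remove_prefixes (code : String) (prefixes : Option (List String)) : String :=
  let ps := match prefixes with
    | none => ["- ", "* "]
    | some l => l
  let cleaned := (PySem.Str.splitlines code).foldl
    (fun acc line => acc ++ [pvStripLoopA ps line]) []
  PySem.Str.join "\n" cleaned

-- ===== PORT B =====
-- state: lines paired with their 'claimed' flags; one pass = the inner
-- 'for i, line in enumerate(lines)' sweep of Source B (each step touches only slot i,
-- so the sweep is a pointwise map over the (line, claimed) pairs)
def pvPassB (p : String) (st : List (String × Bool)) : List (String × Bool) :=
  st.map (fun ld =>
    if !ld.2 && PySem.Str.startswith ld.1 p then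
      (PySem.Str.slice ld.1 (some (PySem.Str.len p)) none, true)
    else ld)

def remove_prefixes_alt (code : String) (prefixes : Option (List String)) : String :=
  let ps := match prefixes with
    | none => ["- ", "* "]
    | some l => l
  let lines := PySem.Str.splitlines code
  let final := ps.foldl (fun st p => pvPassB p st) (lines.map (fun l => (l, false)))
  PySem.Str.join "\n" (final.map Prod.fst)

-- ===== PRECONDITION & SPEC =====
def Spec_remove_prefixes (code : String) (prefixes : Option (List String)) (out : String) : Prop := out = remove_prefixes_alt code prefixes
instance (code : String) (prefixes : Option (List String)) (out : String) : Decidable (Spec_remove_prefixes code prefixes out) := by unfold Spec_remove_prefixes; infer_instance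

-- ===== CLAIM (what is proved, stated in full; the proofs are below) =====
def Claim_equal_remove_prefixes : Prop := ∀ (code : String) (prefixes : Option (List String)), Dom_remove_prefixes code prefixes → Spec_remove_prefixes code prefixes (remove_prefixes code prefixes)

-- ===== LEMMAS AND PROOFS =====

-- the per-slot step of one sweep
def pvStepB (ld : String × Bool) (p : String) : String × Bool :=
  if !ld.2 && PySem.Str.startswith ld.1 p then
    (PySem.Str.slice ld.1 (some (PySem.Str.len p)) none, true)
  else ld

-- folding pointwise sweeps over the list = folding the step on each slot independently
theorem pvFoldl_pass_map (ps : List String) (xs : List (String × Bool)) :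
    ps.foldl (fun st p => pvPassB p st) xs = xs.map (fun x => ps.foldl pvStepB x) := by
  induction ps generalizing xs with
  | nil => simp
  | cons p rest ih =>
    simp only [List.foldl_cons]
    rw [show pvPassB p xs = xs.map (fun x => pvStepB x p) from rfl, ih, List.map_map]
    rfl

-- a claimed slot is never touched again
theorem pvFoldl_step_claimed (ps : List String) (l : String) :
    ps.foldl pvStepB (l, true) = (l, true) := by
  induction ps with
  | nil => rfl
  | cons p rest ih => simpa [pvStepB] using ih

-- an unclaimed slot ends up stripped of exactly its first matching prefix
theorem pvFoldl_step_eq_stripA (ps : List String) (l : String) :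
    (ps.foldl pvStepB (l, false)).1 = pvStripLoopA ps l := by
  induction ps with
  | nil => rfl
  | cons p rest ih =>
    by_cases h : PySem.Chars.startswith l.toList p.toList = true
    · simp [pvStepB, PySem.Str.startswith, h, pvFoldl_step_claimed, pvStripLoopA]
    · simpa [pvStepB, PySem.Str.startswith, h, pvStripLoopA] using ih

theorem pvFoldl_append_map {α β : Type} (f : α → β) (xs : List α) (acc : List β) :
    xs.foldl (fun a x => a ++ [f x]) acc = acc ++ xs.map f := by
  induction xs generalizing acc with
  | nil => simp
  | cons x xs ih => simp [List.foldl, ih]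

-- both ports reduce to join of the per-line strip, for any prefix list
theorem pvMain (ps lines : List String) :
    PySem.Str.join "\n" (lines.foldl (fun acc line => acc ++ [pvStripLoopA ps line]) []) =
    PySem.Str.join "\n"
      ((ps.foldl (fun st p => pvPassB p st) (lines.map (fun l => (l, false)))).map Prod.fst) := by
  rw [pvFoldl_append_map, pvFoldl_pass_map, List.map_map]
  simp [Function.comp_def, pvFoldl_step_eq_stripA]

-- ===== VERDICT (by name: the statement is the Claim_ definition above) =====
theorem remove_prefixes_spec : Claim_equal_remove_prefixes := by
  intro code prefixes _
  unfold Spec_remove_prefixes remove_prefixes remove_prefixes_alt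
  exact pvMain _ _
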